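-- pv_equiv track=rewrite | github.com/MC-and-his-Agents/Syvert | syvert/platform_leakage.py | _resolve_container_aliases
-- ===== SOURCE A (Python) =====
-- from collections.abc import Iterable, Mapping, Sequence
--
-- def _resolve_container_aliases(
--     events: Sequence[tuple[tuple[int, int], frozenset[str], bool]],
--     position: tuple[int, int],
-- ) -> frozenset[str]:
--     active_values: set[str] = set()
--     for event_position, value, branch_local in events:
--         if event_position >= position:
--             break
--         if branch_local:
--             active_values.update(value)
--             continue
--         active_values = set(value)
--     return frozenset(active_values)
-- ===== SOURCE B (Python) =====
-- def _resolve_container_aliases(events, position):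
--     # Cut the prefix at the first event at/after position.
--     prefix = []
--     for event in events:
--         if event[0] >= position:
--             break
--         prefix.append(event)
--     # Walk the prefix backwards: collect branch-local values until the last reset.
--     tail_rev = []
--     base = frozenset()
--     for event in reversed(prefix):
--         if event[2]:
--             tail_rev.append(event[1])
--         else:
--             base = event[1]
--             break
--     active = set(base)
--     for value in reversed(tail_rev):
--         active |= value
--     return frozenset(active)
-- ===== Notes on version B (the rewrite author's own statement) =====
-- stated objective: alternative
-- what changed: Instead of replaying every reset forward, B cuts the prefix at the first event at/after position, scans it backwards to find the last reset, and unions that reset's value with the branch-local values after it.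
import Mathlib
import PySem

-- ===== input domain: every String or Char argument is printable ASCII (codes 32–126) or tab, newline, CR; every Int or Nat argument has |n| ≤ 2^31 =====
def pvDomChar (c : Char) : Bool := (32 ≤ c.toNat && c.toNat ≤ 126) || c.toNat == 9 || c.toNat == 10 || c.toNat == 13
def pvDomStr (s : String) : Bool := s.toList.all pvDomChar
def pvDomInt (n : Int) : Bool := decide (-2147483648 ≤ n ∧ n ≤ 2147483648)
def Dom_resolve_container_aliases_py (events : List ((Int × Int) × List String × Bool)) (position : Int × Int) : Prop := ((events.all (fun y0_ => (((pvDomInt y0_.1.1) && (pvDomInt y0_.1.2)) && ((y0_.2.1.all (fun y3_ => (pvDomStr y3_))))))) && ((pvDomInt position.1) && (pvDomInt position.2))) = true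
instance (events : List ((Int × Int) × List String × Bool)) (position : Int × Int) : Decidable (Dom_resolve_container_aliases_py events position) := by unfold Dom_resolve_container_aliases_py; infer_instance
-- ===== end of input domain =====

-- B replaces A's forward replay of resets by: cut the prefix at the first event at/after
-- position, scan it backwards to the last reset, then union that value with the
-- branch-local values after it (objective: alternative decomposition, same O(n) cost).

-- Python tuple comparison (a, b) >= (c, d), lexicographic
def pvPairGe (a b : Int × Int) : Bool := a.1 > b.1 || (a.1 == b.1 && a.2 ≥ b.2)

-- ===== PORT A =====
-- the for-loop with its early break, threading active_values
def pvGoA (pos : Int × Int) (acc : PySem.Set String) :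
    List ((Int × Int) × List String × Bool) → PySem.Set String
  | [] => acc
  | e :: rest =>
    if pvPairGe e.1 pos then acc
    else if e.2.2 then pvGoA pos (PySem.Set.update acc e.2.1) rest
    else pvGoA pos (PySem.Set.ofList e.2.1) rest

def resolve_container_aliases_py (events : List ((Int × Int) × List String × Bool)) (position : Int × Int) : List String :=
  pvGoA position PySem.Set.empty events

-- ===== PORT B =====
def resolve_container_aliases_py_alt (events : List ((Int × Int) × List String × Bool)) (position : Int × Int) : List String :=
  let pref := events.takeWhile (fun e => !pvPairGe e.1 position)
  let rev := pref.reverse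
  let tailRev := rev.takeWhile (fun e => e.2.2)      -- branch-local values after the last reset, reversed
  let base : PySem.Set String :=
    match rev.dropWhile (fun e => e.2.2) with        -- the last reset, if any, heads this list
    | [] => PySem.Set.empty
    | e :: _ => PySem.Set.ofList e.2.1
  tailRev.reverse.foldl (fun s e => PySem.Set.update s e.2.1) base

-- ===== PRECONDITION & SPEC =====
def Spec_resolve_container_aliases_py (events : List ((Int × Int) × List String × Bool)) (position : Int × Int) (out : List String) : Prop := out = resolve_container_aliases_py_alt events position
instance (events : List ((Int × Int) × List String × Bool)) (position : Int × Int) (out : List String) : Decidable (Spec_resolve_container_aliases_py events position out) := by unfold Spec_resolve_container_aliases_py; infer_instance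

-- ===== CLAIM (what is proved, stated in full; the proofs are below) =====
def Claim_equal_resolve_container_aliases_py : Prop := ∀ (events : List ((Int × Int) × List String × Bool)) (position : Int × Int), Dom_resolve_container_aliases_py events position → Spec_resolve_container_aliases_py events position (resolve_container_aliases_py events position)

-- ===== LEMMAS AND PROOFS =====

-- the step of A's loop, without the break
def pvStep (s : PySem.Set String) (e : (Int × Int) × List String × Bool) : PySem.Set String :=
  if e.2.2 then PySem.Set.update s e.2.1 else PySem.Set.ofList e.2.1

-- A's break-on-first-hit loop is the plain fold over the takeWhile prefix
theorem pvGoA_eq_foldl_takeWhile (pos : Int × Int) (acc : PySem.Set String)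
    (events : List ((Int × Int) × List String × Bool)) :
    pvGoA pos acc events =
      (events.takeWhile (fun e => !pvPairGe e.1 pos)).foldl pvStep acc := by
  induction events generalizing acc with
  | nil => rfl
  | cons e rest ih =>
    by_cases h : pvPairGe e.1 pos = true
    · simp [pvGoA, h, List.takeWhile]
    · have h' : (!pvPairGe e.1 pos) = true := by simp [h]
      by_cases hb : e.2.2 = true <;>
        simp [pvGoA, h, hb, pvStep, ih]

-- the forward fold equals B's backward decomposition of the same prefix
theorem pvFoldl_eq_span_rev (l : List ((Int × Int) × List String × Bool)) :
    l.foldl pvStep PySem.Set.empty =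
      (l.reverse.takeWhile (fun e => e.2.2)).reverse.foldl
        (fun s e => PySem.Set.update s e.2.1)
        (match l.reverse.dropWhile (fun e => e.2.2) with
         | [] => PySem.Set.empty
         | e :: _ => PySem.Set.ofList e.2.1) := by
  induction l using List.reverseRecOn with
  | nil => rfl
  | append_singleton l' e ih =>
    by_cases hb : e.2.2 = true
    · simp only [List.foldl_append, List.foldl_cons, List.foldl_nil,
        List.reverse_append, List.reverse_cons, List.reverse_nil, List.nil_append,
        List.cons_append, List.takeWhile_cons, List.dropWhile_cons, hb,
        List.foldl_reverse, if_true, pvStep] at ih ⊢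
      rw [ih]
    · have hb' : e.2.2 = false := by simpa using hb
      simp [hb', pvStep]

-- ===== VERDICT (by name: the statement is the Claim_ definition above) =====
theorem resolve_container_aliases_py_spec : Claim_equal_resolve_container_aliases_py := by
  intro events position _
  unfold Spec_resolve_container_aliases_py resolve_container_aliases_py resolve_container_aliases_py_alt
  rw [pvGoA_eq_foldl_takeWhile, pvFoldl_eq_span_rev]
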